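-- pv_equiv track=rewrite | github.com/csm10495/yum-finder | kentacohut.py | intersect_dict_sets
-- ===== SOURCE A (Python) =====
-- from itertools import combinations
--
-- def intersect_dict_sets(data: dict[str, set[str]]) -> dict[tuple[str, ...], set[str]]:
--     max_size = len(data)
--
--     result = {}
--     keys = list(data.keys())
--
--     for size in range(2, max_size + 1):
--         for key_combo in combinations(keys, size):
--             intersection = set.intersection(*(data[key] for key in key_combo))
--             result[key_combo] = intersection
--
--     return result
-- ===== SOURCE B (Python) =====
-- def _with_rest(pairs):
--     # [(element, slice-after-it)] for each position
--     return [(pairs[i], pairs[i + 1:]) for i in range(len(pairs))]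
--
--
-- def intersect_dict_sets(data: dict[str, set[str]]) -> dict[tuple[str, ...], set[str]]:
--     # Level-by-level memoization: each size-(s+1) intersection is one '&' with the
--     # memoized size-s prefix intersection instead of intersecting s+1 sets afresh.
--     # (Same return value as the original on every input.)
--     result = {}
--     items = list(data.items())
--     level = [((k,), v, rest) for (k, v), rest in _with_rest(items)]
--     for _ in range(len(items) - 1):
--         nxt = []
--         for combo, s, rest in level:
--             for (k, v), rest2 in _with_rest(rest):
--                 inter = s & v
--                 nc = combo + (k,)
--                 result[nc] = inter
--                 nxt.append((nc, inter, rest2))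
--         level = nxt
--     return result
-- ===== Notes on version B (the rewrite author's own statement) =====
-- stated objective: alternative
-- what changed: Instead of intersecting all s sets afresh for every size-s key combination, B builds the combinations level by level and memoizes each prefix intersection, so every new combination is derived by a single '&' with its size-(s-1) parent.
import Mathlib
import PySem

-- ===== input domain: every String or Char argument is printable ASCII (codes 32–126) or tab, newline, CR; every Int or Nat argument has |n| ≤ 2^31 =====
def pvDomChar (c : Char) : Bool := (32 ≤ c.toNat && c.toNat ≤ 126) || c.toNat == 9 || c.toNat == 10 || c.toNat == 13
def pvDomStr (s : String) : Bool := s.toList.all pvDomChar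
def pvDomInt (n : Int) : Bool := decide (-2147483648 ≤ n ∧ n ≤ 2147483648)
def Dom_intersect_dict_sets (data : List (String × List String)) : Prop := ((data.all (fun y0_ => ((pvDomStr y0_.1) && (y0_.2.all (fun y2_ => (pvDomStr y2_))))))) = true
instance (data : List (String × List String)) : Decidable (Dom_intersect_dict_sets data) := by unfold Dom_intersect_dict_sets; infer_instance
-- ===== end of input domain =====

-- B builds combinations level by level and memoizes prefix intersections (one '&' per combination) instead of re-intersecting all member sets per combination.


-- ===== PORT A =====
-- set.intersection(*(data[key] for key in key_combo)); the values arrive as Python sets,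
-- so Set.ofList takes the distinct elements of the stored list. combo is never empty when
-- this is executed (sizes start at 2), so the [] branch is unreachable.
def pyIntersectAll (d : PySem.Dict String (List String)) (combo : List String) : PySem.Set String :=
  match combo with
  | [] => PySem.Set.empty
  | k :: rest =>
      rest.foldl (fun acc k' => PySem.Set.inter acc (PySem.Set.ofList (d.getD k' [])))
        (PySem.Set.ofList (d.getD k []))

def intersect_dict_sets (data : List (String × List String)) : List (List String × List String) :=
  let d := PySem.Dict.ofList data
  let max_size : Int := d.size
  let keys := d.keys
  let result : PySem.Dict (List String) (List String) :=
    (PySem.List.pyRange 2 (max_size + 1) 1).foldl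
      (fun result size =>
        (PySem.List.combinations keys size.toNat).foldl
          (fun result combo => result.insert combo (pyIntersectAll d combo)) result)
      PySem.Dict.empty
  result.items

-- ===== PORT B =====
-- _with_rest(pairs) = [(pairs[i], pairs[i+1:]) for i in range(len(pairs))]
def withRest {α : Type} : List α → List (α × List α)
  | [] => []
  | x :: t => (x, t) :: withRest t

-- one pass of Source B's 'for _ in range(len(items) - 1)' loop body (state = (result, level))
def roundB (acc : PySem.Dict (List String) (List String) ×
    List (List String × List String × List (String × List String))) :
    PySem.Dict (List String) (List String) ×
    List (List String × List String × List (String × List String)) :=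
  acc.2.foldl
    (fun acc2 elt =>
      (withRest elt.2.2).foldl
        (fun acc3 q =>
          let inter := PySem.Set.inter elt.2.1 (PySem.Set.ofList q.1.2)
          let nc := elt.1 ++ [q.1.1]
          (acc3.1.insert nc inter, acc3.2 ++ [(nc, inter, q.2)]))
        acc2)
    (acc.1, [])

def intersect_dict_sets_alt (data : List (String × List String)) : List (List String × List String) :=
  let items := (PySem.Dict.ofList data).items
  let level0 : List (List String × List String × List (String × List String)) :=
    (withRest items).map (fun p => ([p.1.1], PySem.Set.ofList p.1.2, p.2))
  let fin :=
    (PySem.List.pyRange 0 ((items.length : Int) - 1) 1).foldl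
      (fun acc _ => roundB acc)
      ((PySem.Dict.empty : PySem.Dict (List String) (List String)), level0)
  fin.1.items

-- ===== PRECONDITION & SPEC =====
def Spec_intersect_dict_sets (data : List (String × List String)) (out : List (List String × List String)) : Prop := out = intersect_dict_sets_alt data
instance (data : List (String × List String)) (out : List (List String × List String)) : Decidable (Spec_intersect_dict_sets data out) := by unfold Spec_intersect_dict_sets; infer_instance

-- ===== CLAIM (what is proved, stated in full; the proofs are below) =====
def Claim_equal_intersect_dict_sets : Prop := ∀ (data : List (String × List String)), Dom_intersect_dict_sets data → Spec_intersect_dict_sets data (intersect_dict_sets data)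

-- ===== LEMMAS AND PROOFS =====

-- combinations together with the suffix that starts right after the last chosen element
def combsR {α : Type} : Nat → List α → List (List α × List α)
  | 0, xs => [([], xs)]
  | _ + 1, [] => []
  | r + 1, x :: t => ((combsR r t).map (fun p => (x :: p.1, p.2))) ++ combsR (r + 1) t

theorem map_fst_combsR {α : Type} (r : Nat) (xs : List α) :
    (combsR r xs).map Prod.fst = PySem.List.combinations xs r := by
  induction xs generalizing r with
  | nil => cases r <;> simp [combsR, PySem.List.combinations_zero, PySem.List.combinations_nil_succ]
  | cons x t ih =>
      cases r with
      | zero => simp [combsR, PySem.List.combinations_zero]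
      | succ s =>
          simp [combsR, PySem.List.combinations_cons_succ, ← ih, List.map_map]

theorem combsR_succ {α : Type} (r : Nat) (xs : List α) :
    combsR (r + 1) xs =
      (combsR r xs).flatMap (fun p => (withRest p.2).map (fun q => (p.1 ++ [q.1], q.2))) := by
  induction xs generalizing r with
  | nil => cases r <;> simp [combsR, withRest]
  | cons x t ih =>
      cases r with
      | zero => simp [combsR, withRest, ih 0]
      | succ s =>
          simp only [combsR, List.flatMap_append, List.flatMap_map, ih s, ih (s + 1),
            List.map_flatMap, List.map_map, Function.comp_def, List.cons_append]

def interFold : List (String × List String) → PySem.Set String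
  | [] => []
  | (_, v) :: t =>
      t.foldl (fun acc e => PySem.Set.inter acc (PySem.Set.ofList e.2)) (PySem.Set.ofList v)

theorem interFold_cons (e : String × List String) (t : List (String × List String)) :
    interFold (e :: t) =
      t.foldl (fun acc e' => PySem.Set.inter acc (PySem.Set.ofList e'.2)) (PySem.Set.ofList e.2) := by
  cases e; rfl

theorem interFold_append (c : List (String × List String)) (hc : c ≠ [])
    (e : String × List String) :
    interFold (c ++ [e]) = PySem.Set.inter (interFold c) (PySem.Set.ofList e.2) := by
  cases c with
  | nil => exact absurd rfl hc
  | cons e0 t => simp [interFold_cons, List.foldl_append]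

theorem mem_combsR {α : Type} {r : Nat} {xs : List α} {p : List α × List α}
    (hp : p ∈ combsR r xs) : p.1.Sublist xs ∧ p.1.length = r := by
  have h1 : p.1 ∈ PySem.List.combinations xs r := by
    rw [← map_fst_combsR]; exact List.mem_map_of_mem hp
  exact (PySem.List.mem_combinations_iff xs r p.1).1 h1

theorem interA_eq (d : PySem.Dict String (List String)) (hn : d.keys.Nodup)
    (c : List (String × List String)) (hsub : c.Sublist d.items) (hne : c ≠ []) :
    pyIntersectAll d (c.map Prod.fst) = interFold c := by
  cases c with
  | nil => exact absurd rfl hne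
  | cons e t =>
      obtain ⟨k, v⟩ := e
      have hmem : (k, v) ∈ d.items := hsub.subset List.mem_cons_self
      have hkv : d.getD k [] = v := PySem.Dict.getD_of_mem_items d hmem hn []
      simp only [List.map_cons, pyIntersectAll, interFold, hkv, List.foldl_map]
      apply PySem.List.foldl_congr_mem
      intro acc e he
      have hm : e ∈ d.items := hsub.subset (List.mem_cons_of_mem _ he)
      rw [PySem.Dict.getD_of_mem_items d hm hn]

-- the (combo-keys, intersection) pairs of size s, in A's/B's common order
def pairsOf (L : List (String × List String)) (s : Nat) : List (List String × List String) :=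
  (combsR s L).map (fun p => (p.1.map Prod.fst, interFold p.1))

def levelOf (L : List (String × List String)) (s : Nat) :
    List (List String × List String × List (String × List String)) :=
  (combsR s L).map (fun p => (p.1.map Prod.fst, interFold p.1, p.2))

theorem foldl_flatMap' {α β γ : Type} (l : List α) (g : α → List β) (f : γ → β → γ) (i : γ) :
    (l.flatMap g).foldl f i = l.foldl (fun a x => (g x).foldl f a) i := by
  induction l generalizing i with
  | nil => rfl
  | cons x t ih => simp [List.flatMap_cons, List.foldl_append, ih]

-- the fresh triples one level element generates
def newItems (elt : List String × List String × List (String × List String)) :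
    List (List String × List String × List (String × List String)) :=
  (withRest elt.2.2).map
    (fun q => (elt.1 ++ [q.1.1], PySem.Set.inter elt.2.1 (PySem.Set.ofList q.1.2), q.2))

theorem flatMap_newItems_levelOf (L : List (String × List String)) (s : Nat) (hs : 1 ≤ s) :
    (levelOf L s).flatMap newItems = levelOf L (s + 1) := by
  unfold levelOf
  rw [List.flatMap_map, combsR_succ s L, List.map_flatMap]
  refine List.flatMap_congr ?_
  intro p hp
  obtain ⟨hsub, hlen⟩ := mem_combsR hp
  have hne : p.1 ≠ [] := by intro h; rw [h] at hlen; simp at hlen; omega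
  unfold newItems
  simp only [List.map_map]
  refine List.map_congr_left ?_
  intro q hq
  simp [interFold_append p.1 hne q.1]

theorem roundB_levelOf (L : List (String × List String)) (s : Nat) (hs : 1 ≤ s)
    (r : PySem.Dict (List String) (List String)) :
    roundB (r, levelOf L s) =
      ((pairsOf L (s + 1)).foldl (fun r p => r.insert p.1 p.2) r, levelOf L (s + 1)) := by
  have h1 : roundB (r, levelOf L s) =
      ((levelOf L s).flatMap newItems).foldl
        (fun acc3 it => (acc3.1.insert it.1 it.2.1, acc3.2 ++ [it])) (r, []) := by
    rw [foldl_flatMap']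
    unfold roundB newItems
    simp only [List.foldl_map]
  have h2 := PySem.List.foldl_prod_mk
    (fun (dd : PySem.Dict (List String) (List String))
         (it : List String × List String × List (String × List String)) => dd.insert it.1 it.2.1)
    (fun l it => l ++ [it]) (levelOf L (s + 1)) r ([] : List _)
  rw [h1, flatMap_newItems_levelOf L s hs]
  simp only [] at h2
  rw [h2, PySem.List.foldl_append_singleton_eq_self, List.nil_append]
  unfold levelOf pairsOf
  rw [List.foldl_map, List.foldl_map]

theorem iterate_roundB (L : List (String × List String)) (m : Nat)
    (r : PySem.Dict (List String) (List String)) :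
    roundB^[m] (r, levelOf L 1) =
      ((List.range m).foldl (fun r k => (pairsOf L (k + 2)).foldl (fun r p => r.insert p.1 p.2) r) r,
        levelOf L (m + 1)) := by
  induction m with
  | zero => simp
  | succ m ih =>
      rw [Function.iterate_succ_apply', ih, List.range_succ, List.foldl_append]
      simpa using roundB_levelOf L (m + 1) (by omega) _

theorem foldl_ignore_iterate {α β : Type} (l : List β) (F : α → α) (i : α) :
    l.foldl (fun a _ => F a) i = F^[l.length] i := by
  induction l generalizing i with
  | nil => rfl
  | cons x t ih => simp [List.foldl_cons, ih, Function.iterate_succ_apply]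

theorem A_round (d : PySem.Dict String (List String)) (hn : d.keys.Nodup) (s : Nat) (hs : 1 ≤ s)
    (r : PySem.Dict (List String) (List String)) :
    (PySem.List.combinations (d.items.map Prod.fst) s).foldl
        (fun r c => r.insert c (pyIntersectAll d c)) r =
      (pairsOf d.items s).foldl (fun r p => r.insert p.1 p.2) r := by
  rw [PySem.List.combinations_map, ← map_fst_combsR, List.map_map, List.foldl_map]
  unfold pairsOf
  rw [List.foldl_map]
  apply PySem.List.foldl_congr_mem
  intro acc p hp
  obtain ⟨hsub, hlen⟩ := mem_combsR hp
  have hne : p.1 ≠ [] := by intro h; rw [h] at hlen; simp at hlen; omega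
  simp [interA_eq d hn p.1 hsub hne]

theorem level0_eq (L : List (String × List String)) :
    (withRest L).map (fun p => ([p.1.1], PySem.Set.ofList p.1.2, p.2)) = levelOf L 1 := by
  unfold levelOf
  rw [combsR_succ 0 L]
  simp only [combsR, List.flatMap_cons, List.flatMap_nil, List.append_nil, List.nil_append,
    List.map_map]
  apply List.map_congr_left
  rintro ⟨⟨a, b⟩, rest⟩ _
  simp [interFold]

-- ===== VERDICT (by name: the statement is the Claim_ definition above) =====
theorem intersect_dict_sets_spec : Claim_equal_intersect_dict_sets := by
  intro data _
  unfold Spec_intersect_dict_sets intersect_dict_sets intersect_dict_sets_alt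
  simp only []
  have hn : (PySem.Dict.ofList data).keys.Nodup := PySem.Dict.nodup_keys_ofList data
  set d := PySem.Dict.ofList data with hd
  set L := d.items with hL
  set n := L.length with hn'
  -- B side
  rw [level0_eq L, foldl_ignore_iterate, PySem.List.length_pyRange_one, iterate_roundB]
  -- A side
  rw [PySem.List.pyRange_one 2 ((d.size : Int) + 1), List.foldl_map]
  have hsz : d.size = n := rfl
  have hm : (((d.size : Int) + 1) - 2).toNat = (((n : Int) - 1) - 0).toNat := by
    rw [hsz]; omega
  rw [hm]
  dsimp only
  congr 1
  apply PySem.List.foldl_congr_mem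
  intro acc k _
  have hk : (2 + (k : Int)).toNat = k + 2 := by omega
  have hkeys : d.keys = L.map Prod.fst := rfl
  rw [hk, hkeys, A_round d hn (k + 2) (by omega) acc]
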